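-- pv_equiv track=rewrite | github.com/mid-kid/pmdrtdx_passwords | app.py | password_val2char
-- ===== SOURCE A (Python) =====
-- charmap_symbols = [
--     "1F", "2F", "3F", "4F", "5F", "6F", "7F", "8F", "9F", "PF", "MF", "DF", "XF",
--     "1H", "2H", "3H", "4H", "5H", "6H", "7H", "8H", "9H", "PH", "MH", "DH", "XH",
--     "1W", "2W", "3W", "4W", "5W", "6W", "7W", "8W", "9W", "PW", "MW", "DW", "XW",
--     "1E", "2E", "3E", "4E", "5E", "6E", "7E", "8E", "9E", "PE", "ME", "DE", "XE",
--     "1S", "2S", "3S", "4S", "5S", "6S", "7S", "8S", "9S", "PS", "MS", "DS", #"XS",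
-- ]
--
-- def password_val2char(code):
--     password = ""
--     for index, val in enumerate(code):
--         symbol = charmap_symbols[val]
--         password += symbol[0].upper()
--         password += symbol[1].lower()
--         if index % 15 == 14:
--             password += "\n"
--         elif index % 5 == 4:
--             password += " "
--     return password.strip()
-- ===== SOURCE B (Python) =====
-- charmap_symbols = [
--     "1F", "2F", "3F", "4F", "5F", "6F", "7F", "8F", "9F", "PF", "MF", "DF", "XF",
--     "1H", "2H", "3H", "4H", "5H", "6H", "7H", "8H", "9H", "PH", "MH", "DH", "XH",
--     "1W", "2W", "3W", "4W", "5W", "6W", "7W", "8W", "9W", "PW", "MW", "DW", "XW",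
--     "1E", "2E", "3E", "4E", "5E", "6E", "7E", "8E", "9E", "PE", "ME", "DE", "XE",
--     "1S", "2S", "3S", "4S", "5S", "6S", "7S", "8S", "9S", "PS", "MS", "DS", #"XS",
-- ]
--
--
-- def _chunks(xs, n):
--     out = []
--     while xs:
--         out.append(xs[:n])
--         xs = xs[n:]
--     return out
--
--
-- def password_val2char(code):
--     tokens = [charmap_symbols[val][0].upper() + charmap_symbols[val][1].lower()
--               for val in code]
--     lines = [" ".join("".join(group) for group in _chunks(line, 5))
--              for line in _chunks(tokens, 15)]
--     return "\n".join(lines)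
-- ===== Notes on version B (the rewrite author's own statement) =====
-- stated objective: simpler
-- what changed: B first maps each value to its two-char token, then reshapes the token list by chunking into lines of 15 and groups of 5 joined with separators, so no index-modulo separator logic and no trailing-separator strip is needed; A's inline modulo branches and final .strip() disappear.
import Mathlib
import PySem

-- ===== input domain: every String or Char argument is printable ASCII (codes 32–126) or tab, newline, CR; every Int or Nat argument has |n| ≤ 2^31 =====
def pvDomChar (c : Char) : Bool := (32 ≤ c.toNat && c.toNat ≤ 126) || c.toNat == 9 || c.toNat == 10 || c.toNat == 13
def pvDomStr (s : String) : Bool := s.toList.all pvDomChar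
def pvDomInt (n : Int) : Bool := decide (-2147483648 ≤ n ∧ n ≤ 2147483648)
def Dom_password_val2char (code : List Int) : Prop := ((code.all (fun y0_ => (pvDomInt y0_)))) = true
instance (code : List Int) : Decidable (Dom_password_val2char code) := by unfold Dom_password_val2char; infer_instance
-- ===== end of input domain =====

-- B reshapes a token list by chunking (15 per line, 5 per group) instead of A's
-- inline index-modulo separators plus final strip; same return value, objective: simpler.

def charmap_symbols : List String := [
  "1F", "2F", "3F", "4F", "5F", "6F", "7F", "8F", "9F", "PF", "MF", "DF", "XF",
  "1H", "2H", "3H", "4H", "5H", "6H", "7H", "8H", "9H", "PH", "MH", "DH", "XH",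
  "1W", "2W", "3W", "4W", "5W", "6W", "7W", "8W", "9W", "PW", "MW", "DW", "XW",
  "1E", "2E", "3E", "4E", "5E", "6E", "7E", "8E", "9E", "PE", "ME", "DE", "XE",
  "1S", "2S", "3S", "4S", "5S", "6S", "7S", "8S", "9S", "PS", "MS", "DS"]

-- ===== PORT A =====
-- charmap_symbols[val] raises IndexError outside -64 ≤ val < 64; Pre_ excludes that,
-- so the `.getD` defaults below are never reached on admitted inputs.
def password_val2char (code : List Int) : String :=
  let password := (PySem.List.enumerate code).foldl (fun password iv =>
    let symbol := (PySem.List.pyGet? charmap_symbols iv.2).getD ""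
    let password := password ++ PySem.Str.upper (String.ofList [(PySem.Str.pyGet? symbol 0).getD ' '])
    let password := password ++ PySem.Str.lower (String.ofList [(PySem.Str.pyGet? symbol 1).getD ' '])
    if PySem.Int.mod iv.1 15 == 14 then password ++ "\n"
    else if PySem.Int.mod iv.1 5 == 4 then password ++ " "
    else password) ""
  PySem.Str.strip password

-- ===== PORT B =====
-- Source B's _chunks: successive slices xs[:n] / xs[n:] while xs is nonempty
def pvChunks {α : Type} (n : Nat) : List α → List (List α)
  | [] => []
  | x :: rest => (x :: rest.take (n - 1)) :: pvChunks n (rest.drop (n - 1))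
  termination_by xs => xs.length
  decreasing_by simp

def password_val2char_alt (code : List Int) : String :=
  let tokens := code.map (fun val =>
    let symbol := (PySem.List.pyGet? charmap_symbols val).getD ""
    PySem.Str.upper (String.ofList [(PySem.Str.pyGet? symbol 0).getD ' ']) ++
      PySem.Str.lower (String.ofList [(PySem.Str.pyGet? symbol 1).getD ' ']))
  let lines := (pvChunks 15 tokens).map (fun line =>
    PySem.Str.join " " ((pvChunks 5 line).map (fun group => PySem.Str.join "" group)))
  PySem.Str.join "\n" lines

-- ===== PRECONDITION & SPEC =====
-- Pre_ excludes exactly the inputs where A raises IndexError (a value outside the 64-entry charmap, incl. negative-index wraparound down to -64 which both sides handle alike)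
def Pre_password_val2char (code : List Int) : Prop := ∀ v ∈ code, -64 ≤ v ∧ v < 64
instance (code : List Int) : Decidable (Pre_password_val2char code) := by unfold Pre_password_val2char; infer_instance
def pvWitness_password_val2char : List Int := [0, 5, 62, -1, 30]

def Spec_password_val2char (code : List Int) (out : String) : Prop := out = password_val2char_alt code
instance (code : List Int) (out : String) : Decidable (Spec_password_val2char code out) := by unfold Spec_password_val2char; infer_instance

-- ===== CLAIM (what is proved, stated in full; the proofs are below) =====
def Claim_equal_password_val2char : Prop := ∀ (code : List Int), Dom_password_val2char code → Pre_password_val2char code → Spec_password_val2char code (password_val2char code)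

-- ===== LEMMAS AND PROOFS =====

-- proof-side view of one token as a two-char list
def pvTok (v : Int) : List Char :=
  let symbol := (PySem.List.pyGet? charmap_symbols v).getD ""
  [PySem.Chars.upperChar ((PySem.Str.pyGet? symbol 0).getD ' '),
   PySem.Chars.lowerChar ((PySem.Str.pyGet? symbol 1).getD ' ')]

-- the separator A appends after index i
def pvSep (i : Nat) : List Char :=
  if i % 15 = 14 then ['\n'] else if i % 5 = 4 then [' '] else []

-- A's loop over the token list, char-list view, starting at index i
def pvG : Nat → List (List Char) → List Char
  | _, [] => []
  | i, t :: ts => t ++ pvSep i ++ pvG (i + 1) ts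

-- B's shape, char-list view
def pvLine (ts : List (List Char)) : List Char :=
  PySem.Chars.join [' '] ((pvChunks 5 ts).map (fun g => PySem.Chars.join [] g))

def pvB (ts : List (List Char)) : List Char :=
  PySem.Chars.join ['\n'] ((pvChunks 15 ts).map pvLine)

-- the trailing separator A's strip removes
def pvTail (ts : List (List Char)) : List Char :=
  if ts = [] then [] else pvSep (ts.length - 1)

lemma pvChunks_map {A B : Type} (n : Nat) (f : A → B) : ∀ (l : List A),
    pvChunks n (l.map f) = (pvChunks n l).map (List.map f) := by
  intro l
  induction l using pvChunks.induct n with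
  | case1 => simp [pvChunks]
  | case2 x rest ih =>
    simp only [pvChunks, List.map_cons, List.cons.injEq, true_and]
    constructor
    · rw [← List.map_take]
    · rw [← List.map_drop, ih]

lemma pvChunks_mem {A : Type} (n : Nat) : ∀ (xs : List A), ∀ c ∈ pvChunks n xs,
    c ≠ [] ∧ ∀ x ∈ c, x ∈ xs := by
  intro xs
  induction xs using pvChunks.induct n with
  | case1 => simp [pvChunks]
  | case2 x rest ih =>
    intro c hc
    rw [pvChunks] at hc
    rcases List.mem_cons.mp hc with rfl | hc
    · refine ⟨by simp, ?_⟩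
      intro y hy
      rcases List.mem_cons.mp hy with rfl | hy
      · simp
      · exact List.mem_cons_of_mem _ (List.mem_of_mem_take hy)
    · obtain ⟨h1, h2⟩ := ih c hc
      exact ⟨h1, fun y hy => List.mem_cons_of_mem _ (List.mem_of_mem_drop (h2 y hy))⟩

lemma pvChunks_ne_nil {A : Type} (n : Nat) (x : A) (xs : List A) :
    pvChunks n (x :: xs) ≠ [] := by
  rw [pvChunks]; simp

lemma pvSep_add15 (i : Nat) : pvSep (i + 15) = pvSep i := by
  have h5 : (i + 15) % 5 = i % 5 := by omega
  simp [pvSep, Nat.add_mod_right, h5]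

lemma pvG_add15 (ts : List (List Char)) : ∀ (i : Nat), pvG (i + 15) ts = pvG i ts := by
  induction ts with
  | nil => simp [pvG]
  | cons t ts ih =>
    intro i
    have : i + 15 + 1 = (i + 1) + 15 := by omega
    simp only [pvG, pvSep_add15, this, ih]

lemma pvG_append (xs ys : List (List Char)) : ∀ (i : Nat),
    pvG i (xs ++ ys) = pvG i xs ++ pvG (i + xs.length) ys := by
  induction xs with
  | nil => simp [pvG]
  | cons t ts ih =>
    intro i
    simp only [List.cons_append, pvG, ih (i+1), List.length_cons, List.append_assoc]
    ring_nf

lemma pvBase15 (ts : List (List Char)) (h : ts.length ≤ 15) :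
    pvG 0 ts = pvLine ts ++ pvTail ts := by
  rcases ts with _|⟨t0,ts⟩
  · simp [pvG, pvLine, pvTail, pvChunks, PySem.Chars.join, List.intercalate]
  rcases ts with _|⟨t1,ts⟩
  · simp [pvG, pvLine, pvTail, pvChunks, pvSep, PySem.Chars.join, List.intercalate, List.intersperse]
  rcases ts with _|⟨t2,ts⟩
  · simp [pvG, pvLine, pvTail, pvChunks, pvSep, PySem.Chars.join, List.intercalate, List.intersperse]
  rcases ts with _|⟨t3,ts⟩
  · simp [pvG, pvLine, pvTail, pvChunks, pvSep, PySem.Chars.join, List.intercalate, List.intersperse]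
  rcases ts with _|⟨t4,ts⟩
  · simp [pvG, pvLine, pvTail, pvChunks, pvSep, PySem.Chars.join, List.intercalate, List.intersperse]
  rcases ts with _|⟨t5,ts⟩
  · simp [pvG, pvLine, pvTail, pvChunks, pvSep, PySem.Chars.join, List.intercalate, List.intersperse]
  rcases ts with _|⟨t6,ts⟩
  · simp [pvG, pvLine, pvTail, pvChunks, pvSep, PySem.Chars.join, List.intercalate, List.intersperse]
  rcases ts with _|⟨t7,ts⟩
  · simp [pvG, pvLine, pvTail, pvChunks, pvSep, PySem.Chars.join, List.intercalate, List.intersperse]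
  rcases ts with _|⟨t8,ts⟩
  · simp [pvG, pvLine, pvTail, pvChunks, pvSep, PySem.Chars.join, List.intercalate, List.intersperse]
  rcases ts with _|⟨t9,ts⟩
  · simp [pvG, pvLine, pvTail, pvChunks, pvSep, PySem.Chars.join, List.intercalate, List.intersperse]
  rcases ts with _|⟨t10,ts⟩
  · simp [pvG, pvLine, pvTail, pvChunks, pvSep, PySem.Chars.join, List.intercalate, List.intersperse]
  rcases ts with _|⟨t11,ts⟩
  · simp [pvG, pvLine, pvTail, pvChunks, pvSep, PySem.Chars.join, List.intercalate, List.intersperse]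
  rcases ts with _|⟨t12,ts⟩
  · simp [pvG, pvLine, pvTail, pvChunks, pvSep, PySem.Chars.join, List.intercalate, List.intersperse]
  rcases ts with _|⟨t13,ts⟩
  · simp [pvG, pvLine, pvTail, pvChunks, pvSep, PySem.Chars.join, List.intercalate, List.intersperse]
  rcases ts with _|⟨t14,ts⟩
  · simp [pvG, pvLine, pvTail, pvChunks, pvSep, PySem.Chars.join, List.intercalate, List.intersperse]
  rcases ts with _|⟨t15,ts⟩
  · simp [pvG, pvLine, pvTail, pvChunks, pvSep, PySem.Chars.join, List.intercalate, List.intersperse]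
  · simp at h; omega

lemma pvB_small (ts : List (List Char)) (hne : ts ≠ []) (h : ts.length ≤ 15) :
    pvB ts = pvLine ts := by
  rcases ts with _|⟨x,r⟩
  · simp at hne
  have htake : r.take 14 = r := List.take_of_length_le (by simp at h; omega)
  have hdrop : r.drop 14 = [] := List.drop_eq_nil_of_le (by simp at h; omega)
  simp [pvB, pvChunks, htake, hdrop, PySem.Chars.join_singleton]

lemma pvCore : ∀ (n : Nat) (ts : List (List Char)), ts.length ≤ n →
    pvG 0 ts = pvB ts ++ pvTail ts := by
  intro n
  induction n with
  | zero =>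
    intro ts h
    have : ts = [] := List.eq_nil_of_length_eq_zero (by omega)
    subst this
    simp [pvG, pvB, pvTail, pvChunks, PySem.Chars.join_nil]
  | succ n ih =>
    intro ts h
    by_cases hlen : ts.length ≤ 15
    · rcases ts with _|⟨x,r⟩
      · simp [pvG, pvB, pvTail, pvChunks, PySem.Chars.join_nil]
      · rw [pvB_small _ (by simp) hlen]
        exact pvBase15 _ hlen
    · rw [not_le] at hlen
      have hts : ts = ts.take 15 ++ ts.drop 15 := (List.take_append_drop 15 ts).symm
      have hlena : (ts.take 15).length = 15 := by simp; omega
      have hlenr : (ts.drop 15).length = ts.length - 15 := by simp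
      have hA : pvG 0 ts = (pvLine (ts.take 15) ++ ['\n']) ++ (pvB (ts.drop 15) ++ pvTail (ts.drop 15)) := by
        conv_lhs => rw [hts]
        rw [pvG_append, hlena]
        rw [show pvG (0 + 15) (ts.drop 15) = pvG 0 (ts.drop 15) from pvG_add15 _ 0]
        rw [pvBase15 (ts.take 15) (le_of_eq hlena)]
        rw [ih (ts.drop 15) (by rw [hlenr]; omega)]
        have htt : pvTail (ts.take 15) = ['\n'] := by
          have hne : ts.take 15 ≠ [] := by
            intro hc; rw [hc] at hlena; simp at hlena
          simp [pvTail, hne, hlena, pvSep]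
        rw [htt, List.append_assoc]
      have hchunk : pvChunks 15 ts = ts.take 15 :: pvChunks 15 (ts.drop 15) := by
        rcases ts with _|⟨x,r⟩
        · simp at hlen
        · simp [pvChunks]
      have hrest_ne : ts.drop 15 ≠ [] := by
        intro hc
        have := congrArg List.length hc
        simp at this; omega
      have hB : pvB ts = (pvLine (ts.take 15) ++ ['\n']) ++ pvB (ts.drop 15) := by
        rw [pvB, hchunk]
        rcases hx : pvChunks 15 (ts.drop 15) with _|⟨c, cs⟩
        · rcases hy : ts.drop 15 with _|⟨y, r2⟩
          · exact absurd hy hrest_ne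
          · rw [hy] at hx
            exact absurd hx (by
              simp only [pvChunks]
              simp)
        · rw [List.map_cons, List.map_cons, PySem.Chars.join_cons_cons]
          rw [pvB, hx, List.map_cons]
      have htail : pvTail ts = pvTail (ts.drop 15) := by
        have h1 : ts ≠ [] := by intro hc; rw [hc] at hlen; simp at hlen
        simp only [pvTail, if_neg h1, if_neg hrest_ne, hlenr]
        have : ts.length - 1 = (ts.length - 15 - 1) + 15 := by omega
        rw [this, pvSep_add15]
      rw [hA, hB, htail]
      simp [List.append_assoc]

lemma pvFoldA (code : List Int) : ∀ (k : Nat) (acc : String),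
    ((PySem.List.enumerate code (k : Int)).foldl (fun password iv =>
      let symbol := (PySem.List.pyGet? charmap_symbols iv.2).getD ""
      let password := password ++ PySem.Str.upper (String.ofList [(PySem.Str.pyGet? symbol 0).getD ' '])
      let password := password ++ PySem.Str.lower (String.ofList [(PySem.Str.pyGet? symbol 1).getD ' '])
      if PySem.Int.mod iv.1 15 == 14 then password ++ "\n"
      else if PySem.Int.mod iv.1 5 == 4 then password ++ " "
      else password) acc).toList = acc.toList ++ pvG k (code.map pvTok) := by
  induction code with
  | nil => intro k acc; simp [PySem.List.enumerate, pvG]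
  | cons v vs ih =>
    intro k acc
    rw [show PySem.List.enumerate (v::vs) ((k:Nat):Int)
          = (((k:Nat):Int), v) :: PySem.List.enumerate vs (((k:Nat):Int)+1) from by
        simp [PySem.List.enumerate]]
    rw [List.foldl_cons]
    rw [show (((k:Nat):Int)+1) = (((k+1 : Nat)):Int) from by push_cast; ring]
    rw [ih (k+1)]
    simp only [List.map_cons, pvG, ← List.append_assoc]
    congr 1
    by_cases h15 : k % 15 = 14
    · have i15 : ((k:Int) % 15 = 14) := by omega
      simp [i15, pvTok, pvSep, h15, String.toList_append, PySem.Str.toList_upper,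
        PySem.Str.toList_lower, String.toList_ofList, PySem.Chars.upper, PySem.Chars.lower,
        List.append_assoc]
    · have i15 : ¬((k:Int) % 15 = 14) := by omega
      by_cases h5 : k % 5 = 4
      · have i5 : ((k:Int) % 5 = 4) := by omega
        simp [i15, i5, pvTok, pvSep, h15, h5, String.toList_append,
          PySem.Str.toList_upper, PySem.Str.toList_lower, String.toList_ofList,
          PySem.Chars.upper, PySem.Chars.lower, List.append_assoc]
      · have i5 : ¬((k:Int) % 5 = 4) := by omega
        simp [i15, i5, pvTok, pvSep, h15, h5, String.toList_append,
          PySem.Str.toList_upper, PySem.Str.toList_lower, String.toList_ofList,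
          PySem.Chars.upper, PySem.Chars.lower, List.append_assoc]

lemma pvTokStr_toList (v : Int) :
    (PySem.Str.upper (String.ofList [(PySem.Str.pyGet? ((PySem.List.pyGet? charmap_symbols v).getD "") 0).getD ' ']) ++
      PySem.Str.lower (String.ofList [(PySem.Str.pyGet? ((PySem.List.pyGet? charmap_symbols v).getD "") 1).getD ' '])).toList
      = pvTok v := by
  simp [pvTok, PySem.Str.toList_upper, PySem.Str.toList_lower, PySem.Chars.upper, PySem.Chars.lower]

lemma pvLineStr_toList (l : List String) :
    (PySem.Str.join " " ((pvChunks 5 l).map (fun group => PySem.Str.join "" group))).toList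
      = pvLine (l.map String.toList) := by
  rw [PySem.Str.toList_join, List.map_map, pvLine, pvChunks_map, List.map_map]
  rw [show (" " : String).toList = [' '] from by decide]
  congr 1
  apply List.map_congr_left
  intro g _
  simp only [Function.comp_apply]
  rw [PySem.Str.toList_join]
  rw [show ("" : String).toList = ([] : List Char) from by decide]

lemma pvAltB (code : List Int) :
    (password_val2char_alt code).toList = pvB (code.map pvTok) := by
  unfold password_val2char_alt
  rw [PySem.Str.toList_join, List.map_map]
  rw [show ("\n" : String).toList = ['\n'] from by decide]
  rw [pvB]
  rw [show (code.map pvTok)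
        = (code.map (fun val =>
            let symbol := (PySem.List.pyGet? charmap_symbols val).getD ""
            PySem.Str.upper (String.ofList [(PySem.Str.pyGet? symbol 0).getD ' ']) ++
              PySem.Str.lower (String.ofList [(PySem.Str.pyGet? symbol 1).getD ' ']))).map String.toList from by
      rw [List.map_map]
      exact (List.map_congr_left (fun v _ => (pvTokStr_toList v).symm))]
  conv_rhs => rw [pvChunks_map, List.map_map]
  congr 1
  apply List.map_congr_left
  intro line _
  simp only [Function.comp_apply]
  exact pvLineStr_toList line

-- "solid": nonempty, no leading and no trailing whitespace
def pvSolid (l : List Char) : Prop :=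
  l ≠ [] ∧ l.dropWhile PySem.Chars.isspace = l ∧
    l.reverse.dropWhile PySem.Chars.isspace = l.reverse

lemma pvSolid_append (a b s : List Char)
    (ha : pvSolid a) (hb : pvSolid b) : pvSolid (a ++ s ++ b) := by
  obtain ⟨ha0, ha1, ha2⟩ := ha
  obtain ⟨hb0, hb1, hb2⟩ := hb
  refine ⟨by simp [ha0], ?_, ?_⟩
  · rw [List.append_assoc, List.dropWhile_append, ha1,
      if_neg (by simp [List.isEmpty_iff, ha0])]
  · have hrev : (a ++ s ++ b).reverse = b.reverse ++ (s.reverse ++ a.reverse) := by simp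
    rw [hrev, List.dropWhile_append, hb2, if_neg (by simp [List.isEmpty_iff, hb0])]

lemma pvSolid_join (sep : List Char) : ∀ (parts : List (List Char)), parts ≠ [] →
    (∀ p ∈ parts, pvSolid p) → pvSolid (PySem.Chars.join sep parts) := by
  intro parts
  induction parts with
  | nil => intro h; exact absurd rfl h
  | cons p ps ih =>
    intro _ hall
    rcases ps with _|⟨q, ps'⟩
    · rw [PySem.Chars.join_singleton]
      exact hall p (by simp)
    · rw [PySem.Chars.join_cons_cons]
      exact pvSolid_append _ _ _ (hall p (by simp))
        (ih (by simp) (fun x hx => hall x (List.mem_cons_of_mem _ hx)))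

lemma pvCharmap_chars : ∀ s ∈ charmap_symbols,
    PySem.Chars.isspace (PySem.Chars.upperChar ((PySem.List.pyGet? s.toList 0).getD ' ')) = false ∧
    PySem.Chars.isspace (PySem.Chars.lowerChar ((PySem.List.pyGet? s.toList 1).getD ' ')) = false := by
  decide

lemma pvGet_charmap (v : Int) (h1 : -64 ≤ v) (h2 : v < 64) :
    ∃ s, PySem.List.pyGet? charmap_symbols v = some s ∧ s ∈ charmap_symbols := by
  have hlen : charmap_symbols.length = 64 := by simp [charmap_symbols]
  have hidx : ∃ k, PySem.List.pyIdx? charmap_symbols.length v = some k ∧ k < 64 := by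
    rw [hlen]
    unfold PySem.List.pyIdx?
    split_ifs with hp hq hr
    · exact ⟨v.toNat, rfl, by omega⟩
    · exact absurd h2 (by push_cast at hq; omega)
    · exact ⟨64 - (-v).toNat, rfl, by omega⟩
    · exact absurd h1 (by push_cast at hr; omega)
  obtain ⟨k, hk, hk63⟩ := hidx
  have hget : charmap_symbols[k]? = some charmap_symbols[k] :=
    List.getElem?_eq_getElem (by omega)
  refine ⟨charmap_symbols[k], ?_, List.getElem_mem _⟩
  simp [PySem.List.pyGet?, hk, hget]

lemma pvSolid_tok (v : Int) (h1 : -64 ≤ v) (h2 : v < 64) : pvSolid (pvTok v) := by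
  obtain ⟨s, ho, hs⟩ := pvGet_charmap v h1 h2
  obtain ⟨hc0, hc1⟩ := pvCharmap_chars s hs
  simp only [pvTok, ho, Option.getD_some, PySem.Str.pyGet?]
  refine ⟨by simp, ?_, ?_⟩
  · simp [List.dropWhile, hc0]
  · simp [hc1]

lemma pvSolid_pvB (ts : List (List Char)) (hne : ts ≠ [])
    (h : ∀ t ∈ ts, pvSolid t) : pvSolid (pvB ts) := by
  rw [pvB]
  apply pvSolid_join
  · rcases ts with _|⟨x,r⟩
    · exact absurd rfl hne
    · simpa using pvChunks_ne_nil 15 x r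
  · intro l hl
    obtain ⟨chunk, hchunk, rfl⟩ := List.mem_map.mp hl
    obtain ⟨hcne, hcsub⟩ := pvChunks_mem 15 ts chunk hchunk
    rw [pvLine]
    apply pvSolid_join
    · rcases chunk with _|⟨y,r2⟩
      · exact absurd rfl hcne
      · simpa using pvChunks_ne_nil 5 y r2
    · intro g hg
      obtain ⟨grp, hgrp, rfl⟩ := List.mem_map.mp hg
      obtain ⟨hgne, hgsub⟩ := pvChunks_mem 5 chunk grp hgrp
      apply pvSolid_join _ _ hgne
      intro t ht
      exact h t (hcsub t (hgsub t ht))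

lemma pvStrip_solid (s w : List Char) (hs : pvSolid s)
    (hw : ∀ c ∈ w, PySem.Chars.isspace c = true) :
    PySem.Chars.strip (s ++ w) = s := by
  obtain ⟨h0, h1, h2⟩ := hs
  rw [PySem.Chars.strip, PySem.Chars.lstrip, PySem.Chars.rstrip]
  rw [List.dropWhile_append, h1, if_neg (by simp [List.isEmpty_iff, h0])]
  rw [List.reverse_append]
  rw [List.dropWhile_append]
  rw [if_pos (by
    simp only [List.isEmpty_iff, List.dropWhile_eq_nil_iff]
    intro c hc
    exact hw c (List.mem_reverse.mp hc))]
  rw [h2, List.reverse_reverse]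

lemma pvTail_ws (ts : List (List Char)) : ∀ c ∈ pvTail ts, PySem.Chars.isspace c = true := by
  rw [pvTail]
  split_ifs
  · simp
  · rw [pvSep]
    split_ifs <;> simp <;> decide

-- ===== VERDICT (by name: the statement is the Claim_ definition above) =====
theorem password_val2char_spec : Claim_equal_password_val2char := by
  intro code _hdom hpre
  unfold Spec_password_val2char
  apply String.toList_inj.mp
  rw [pvAltB]
  unfold password_val2char
  rw [PySem.Str.toList_strip]
  have hfold := pvFoldA code 0 ""
  simp only [Nat.cast_zero] at hfold
  rw [hfold]
  rw [show ("" : String).toList = ([] : List Char) from by decide, List.nil_append]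
  rw [pvCore (code.map pvTok).length _ le_rfl]
  rcases code with _|⟨c,cs⟩
  · simp [pvB, pvTail, pvChunks, PySem.Chars.join_nil, PySem.Chars.strip,
      PySem.Chars.lstrip, PySem.Chars.rstrip]
  · apply pvStrip_solid
    · apply pvSolid_pvB _ (by simp)
      intro t ht
      obtain ⟨v, hv, rfl⟩ := List.mem_map.mp ht
      obtain ⟨hv1, hv2⟩ := hpre v hv
      exact pvSolid_tok v hv1 hv2
    · exact pvTail_ws _
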